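-- pv_equiv track=rewrite | github.com/Kyuwon53/Python-algorithm | programmers/Level2/3xn타일링/solution.py | solution
-- ===== SOURCE A (Python) =====
-- def solution(n):
--     # 가로 길이가 2, 세로 길이가 1인 타일로
--     # 가로 길이 n, 세로 길이가 3인 바닥을 채우는 방법
--     # n 일 때의 경우의 수 => 이전 경우의 수 * 3 + 이전 경우의 수들의 특이 케이스들(각 2개) + n일 때 특이 케이스
--     mod = 1000000007
--     dp = [0 for i in range(n + 1)]
--     dp[2] = 3
--     if n > 2:
--         dp[4] = 11
--         for i in range(6, n + 1):
--             dp[i] = dp[i - 2] * 3 + 2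
--             for j in range(i-4, -1, -2):
--                 dp[i] += dp[j] * 2
--             dp[i] = dp[i] % mod
--
--     return dp[n]
-- ===== SOURCE B (Python) =====
-- def solution(n):
--     # One pass: replace the inner scan over older same-parity dp entries by
--     # two running sums, one per parity.
--     mod = 1000000007
--     dp = [0] * (n + 1)
--     dp[2] = 3
--     if n > 2:
--         dp[4] = 11
--         sums = [0, 0]  # sums[p] = sum of dp[j] for j <= i - 4 with j % 2 == p
--         for i in range(6, n + 1):
--             sums[i % 2] += dp[i - 4]
--             dp[i] = (dp[i - 2] * 3 + 2 + 2 * sums[i % 2]) % mod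
--     return dp[n]
-- ===== Notes on version B (the rewrite author's own statement) =====
-- stated objective: faster
-- what changed: Replaces A's O(n^2) inner scan over all older same-parity dp entries by two running sums (one per parity) maintained in a single pass, giving O(n); Pre_ excludes only n < 2 and n = 3, where both A and B raise IndexError on the dp seed writes.
import Mathlib
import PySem

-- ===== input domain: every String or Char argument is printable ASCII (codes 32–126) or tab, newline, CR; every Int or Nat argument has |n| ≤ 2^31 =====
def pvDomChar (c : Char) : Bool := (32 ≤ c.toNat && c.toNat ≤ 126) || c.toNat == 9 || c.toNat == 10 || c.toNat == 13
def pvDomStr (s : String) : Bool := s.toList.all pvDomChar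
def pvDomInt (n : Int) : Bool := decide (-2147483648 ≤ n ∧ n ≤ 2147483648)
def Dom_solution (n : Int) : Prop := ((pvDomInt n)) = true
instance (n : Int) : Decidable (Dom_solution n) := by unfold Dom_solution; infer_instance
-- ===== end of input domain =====

-- B replaces A's O(n^2) inner scan over older same-parity dp entries by two
-- running sums, one per parity, in a single pass; objective: faster.


-- ===== PORT A =====
-- literal transliteration of A; list writes/reads use the total pySetD/pyGetD forms,
-- exact whenever the index is in range (guaranteed by Pre_solution)
def solution (n : Int) : Int :=
  let m : Int := 1000000007
  let dp : List Int := (PySem.List.pyRange 0 (n + 1) 1).map (fun _ => (0 : Int))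
  let dp := PySem.List.pySetD dp 2 3
  let dp :=
    if n > 2 then
      let dp := PySem.List.pySetD dp 4 11
      (PySem.List.pyRange 6 (n + 1) 1).foldl (fun dp i =>
        let dp := PySem.List.pySetD dp i (PySem.List.pyGetD dp (i - 2) 0 * 3 + 2)
        let dp := (PySem.List.pyRange (i - 4) (-1) (-2)).foldl
            (fun dp j =>
              PySem.List.pySetD dp i (PySem.List.pyGetD dp i 0 + PySem.List.pyGetD dp j 0 * 2)) dp
        PySem.List.pySetD dp i (PySem.Int.mod (PySem.List.pyGetD dp i 0) m)) dp
    else dp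
  PySem.List.pyGetD dp n 0

-- ===== PORT B =====
-- transliteration of Source B: one pass, the state is the dp list together with the
-- two-element running-sums list (sums[p] = sum of dp[j], j <= i-4, j % 2 == p)
def solution_alt (n : Int) : Int :=
  let m : Int := 1000000007
  let dp : List Int := (PySem.List.pyRange 0 (n + 1) 1).map (fun _ => (0 : Int))
  let dp := PySem.List.pySetD dp 2 3
  let st : List Int × List Int :=
    if n > 2 then
      let dp := PySem.List.pySetD dp 4 11
      (PySem.List.pyRange 6 (n + 1) 1).foldl (fun st i =>
        let p := PySem.Int.mod i 2
        let sums := PySem.List.pySetD st.2 p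
            (PySem.List.pyGetD st.2 p 0 + PySem.List.pyGetD st.1 (i - 4) 0)
        let dp := PySem.List.pySetD st.1 i
            (PySem.Int.mod (PySem.List.pyGetD st.1 (i - 2) 0 * 3 + 2
              + 2 * PySem.List.pyGetD sums p 0) m)
        (dp, sums)) (dp, ([0, 0] : List Int))
    else (dp, ([0, 0] : List Int))
  PySem.List.pyGetD st.1 n 0

-- ===== PRECONDITION & SPEC =====
-- Pre_ excludes exactly the inputs where A raises IndexError: n < 2 (the write dp[2] = 3
-- fails) and n = 3 (the write dp[4] = 11 fails); A returns normally on every other input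
-- (and B raises on exactly the same inputs).
def Pre_solution (n : Int) : Prop := 2 ≤ n ∧ n ≠ 3
instance (n : Int) : Decidable (Pre_solution n) := by unfold Pre_solution; infer_instance
def pvWitness_solution : Int := 6

def Spec_solution (n : Int) (out : Int) : Prop := out = solution_alt n
instance (n : Int) (out : Int) : Decidable (Spec_solution n out) := by unfold Spec_solution; infer_instance

-- ===== CLAIM (what is proved, stated in full; the proofs are below) =====
def Claim_equal_solution : Prop := ∀ (n : Int), Dom_solution n → Pre_solution n → Spec_solution n (solution n)

-- ===== LEMMAS AND PROOFS =====

-- the two-term recurrence both dp parity chains satisfy, as a sequence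
def chain (a b : Int) : Nat → Int
  | 0 => a
  | 1 => b
  | k + 2 => PySem.Int.mod (4 * chain a b (k + 1) - chain a b k) 1000000007

-- prefix sums of chain
def schain (a b : Int) : Nat → Int
  | 0 => a
  | k + 1 => schain a b k + chain a b (k + 1)

-- the value the dp array holds at a processed index j
def val (j : Int) : Int :=
  if j % 2 = 0 then (if j ≤ 0 then 0 else chain 3 11 ((j - 2) / 2).toNat)
  else (if j < 5 then 0 else chain 0 2 ((j - 5) / 2).toNat)

-- the dp array after the loop has processed indices ≤ m
def mk (n m : Int) : List Int :=
  (PySem.List.pyRange 0 (n + 1) 1).map (fun j => if j ≤ m then val j else 0)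

-- B's running sums: Se m = sum of val j over even j ≤ m, So m over odd j ≤ m
def Se (m : Int) : Int := if m ≤ 1 then 0 else schain 3 11 ((m - 2) / 2).toNat
def So (m : Int) : Int := if m ≤ 4 then 0 else schain 0 2 ((m - 5) / 2).toNat

lemma chain_emod (a b : Int) (k : Nat) :
    chain a b (k + 2) = (4 * chain a b (k + 1) - chain a b k) % 1000000007 := by
  rw [show chain a b (k+2) = PySem.Int.mod (4 * chain a b (k + 1) - chain a b k) 1000000007 from rfl,
    PySem.Int.mod_eq_emod_of_pos (by norm_num)]

-- "3*previous + 2 + twice all older same-parity values" differs from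
-- "4*previous - previous-but-one" by a multiple of the modulus
lemma chain_aux (a b : Int) (h : b = 3 * a + 2) :
    ∀ k : Nat, ∃ t : Int,
      3 * chain a b (k + 1) + 2 + 2 * schain a b k
        = (4 * chain a b (k + 1) - chain a b k) + 1000000007 * t := by
  intro k
  induction k with
  | zero => exact ⟨0, by simp [chain, schain]; omega⟩
  | succ k ih =>
    obtain ⟨t, ht⟩ := ih
    refine ⟨t + (4 * chain a b (k + 1) - chain a b k) / 1000000007, ?_⟩
    have h2 := chain_emod a b k
    have hs : schain a b (k + 1) = schain a b k + chain a b (k + 1) := rfl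
    have hd : (4 * chain a b (k + 1) - chain a b k) % 1000000007
        = (4 * chain a b (k + 1) - chain a b k)
          - 1000000007 * ((4 * chain a b (k + 1) - chain a b k) / 1000000007) := by
      omega
    rw [hs]
    rw [h2] at *
    omega

lemma chain_step (a b : Int) (h : b = 3 * a + 2) (k : Nat) :
    PySem.Int.mod (3 * chain a b (k + 1) + 2 + 2 * schain a b k) 1000000007
      = chain a b (k + 2) := by
  obtain ⟨t, ht⟩ := chain_aux a b h k
  rw [ht, PySem.Int.mod_eq_emod_of_pos (by norm_num), chain_emod]
  omega

-- range(a, -1, -2) unrolls one element at a time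
lemma rstep (a : Int) (h : 0 ≤ a) :
    PySem.List.pyRange a (-1) (-2) = a :: PySem.List.pyRange (a - 2) (-1) (-2) := by
  simp only [PySem.List.pyRange]
  norm_num
  rw [if_pos (by omega : (-1:Int) < a)]
  by_cases h2 : (2:Int) < 1 + a
  · rw [if_pos h2]
    have hc : ((a + 1 + 2 - 1) / 2).toNat = ((a - 2 + 1 + 2 - 1) / 2).toNat + 1 := by omega
    rw [hc, List.range_succ_eq_map]
    simp only [List.map_cons, List.map_map]
    refine List.cons_eq_cons.mpr ⟨by norm_num, ?_⟩
    apply List.map_congr_left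
    intro k _
    simp only [Function.comp_apply]
    push_cast
    ring
  · rw [if_neg h2]
    have hc : ((a + 1 + 2 - 1) / 2).toNat = 1 := by omega
    rw [hc]
    simp [List.range_succ]

-- every element of range(a, -1, -2) lies in [0, a]
lemma mem_rstep (a x : Int) (hx : x ∈ PySem.List.pyRange a (-1) (-2)) : 0 ≤ x ∧ x ≤ a := by
  simp only [PySem.List.pyRange] at hx
  norm_num at hx
  by_cases ha : (-1:Int) < a
  · rw [if_pos ha] at hx
    obtain ⟨k, hk, rfl⟩ := hx
    omega
  · rw [if_neg ha] at hx
    exact absurd hx (by simp)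

lemma val_even (k : Nat) : val (2 * (k : Int) + 2) = chain 3 11 k := by
  have h2 : (2 * (k : Int) + 2) % 2 = 0 := by omega
  have hq : ((2 * (k : Int) + 2 - 2) / 2).toNat = k := by omega
  simp only [val, if_pos h2, hq]
  rw [if_neg (by omega)]

lemma val_odd (k : Nat) : val (2 * (k : Int) + 5) = chain 0 2 k := by
  have h2 : ¬ (2 * (k : Int) + 5) % 2 = 0 := by omega
  have hq : ((2 * (k : Int) + 5 - 5) / 2).toNat = k := by omega
  simp only [val, if_neg h2, hq]
  by_cases h5 : (2 * (k : Int) + 5) < 5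
  · omega
  · rw [if_neg h5]

lemma sumEven : ∀ k : Nat,
    ((PySem.List.pyRange (2 * (k : Int) + 2) (-1) (-2)).map val).sum = schain 3 11 k := by
  intro k
  induction k with
  | zero =>
    norm_num
    rw [show PySem.List.pyRange 2 (-1) (-2) = [2, 0] from by decide]
    simp [val, schain, chain]
  | succ k ih =>
    have : 2 * ((k + 1 : Nat) : Int) + 2 = (2 * (k : Int) + 2) + 2 := by push_cast; ring
    rw [this, rstep _ (by omega)]
    simp only [List.map_cons, List.sum_cons, add_sub_cancel_right, ih]
    rw [show (2 * (k : Int) + 2) + 2 = 2 * ((k+1 : Nat) : Int) + 2 by push_cast; ring, val_even]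
    show chain 3 11 (k+1) + schain 3 11 k = schain 3 11 (k+1)
    rw [schain]; ring

lemma sumOdd : ∀ k : Nat,
    ((PySem.List.pyRange (2 * (k : Int) + 5) (-1) (-2)).map val).sum = schain 0 2 k := by
  intro k
  induction k with
  | zero =>
    norm_num
    rw [show PySem.List.pyRange 5 (-1) (-2) = [5, 3, 1] from by decide]
    simp [val, schain, chain]
  | succ k ih =>
    have : 2 * ((k + 1 : Nat) : Int) + 5 = (2 * (k : Int) + 5) + 2 := by push_cast; ring
    rw [this, rstep _ (by omega)]
    simp only [List.map_cons, List.sum_cons, add_sub_cancel_right, ih]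
    rw [show (2 * (k : Int) + 5) + 2 = 2 * ((k+1 : Nat) : Int) + 5 by push_cast; ring, val_odd]
    show chain 0 2 (k+1) + schain 0 2 k = schain 0 2 (k+1)
    rw [schain]; ring

lemma getD_setD_eq (dp : List Int) (i : Int) (v : Int) (h0 : 0 ≤ i) (h1 : i < dp.length) :
    PySem.List.pyGetD (PySem.List.pySetD dp i v) i 0 = v := by
  rw [PySem.List.pySetD_of_nonneg dp v h0,
    PySem.List.pyGetD_eq_getElem _ 0 h0 (by simpa using h1)]
  rw [List.getElem_set_self]

lemma getD_setD_ne (dp : List Int) (i j : Int) (v : Int) (hne : j ≠ i) (h0 : 0 ≤ j) (hi : 0 ≤ i) :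
    PySem.List.pyGetD (PySem.List.pySetD dp i v) j 0 = PySem.List.pyGetD dp j 0 := by
  rw [PySem.List.pySetD_of_nonneg dp v hi]
  by_cases hj : (j : Int) < dp.length
  · rw [PySem.List.pyGetD_eq_getElem _ 0 h0 (by simpa using hj),
      PySem.List.pyGetD_eq_getElem _ 0 h0 hj, List.getElem_set_ne (by omega)]
  · have e : ∀ xs : List Int, xs.length = dp.length → PySem.List.pyGet? xs j = none := by
      intro xs hlen
      simp only [PySem.List.pyGet?, PySem.List.pyIdx?, hlen, if_pos h0, if_neg hj]
      rfl
    simp only [PySem.List.pyGetD, e _ (List.length_set (as := dp)), e dp rfl]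

lemma setD_setD (dp : List Int) (i : Int) (v w : Int) (hi : 0 ≤ i) :
    PySem.List.pySetD (PySem.List.pySetD dp i v) i w = PySem.List.pySetD dp i w := by
  simp [PySem.List.pySetD_of_nonneg _ _ hi, List.set_set]

-- the inner "dp[i] += dp[j] * 2" loop adds twice the sum of older entries
lemma inner_fold (i : Int) (hi : 0 ≤ i) : ∀ (l : List Int) (dp : List Int),
    (i : Int) < dp.length → (∀ j ∈ l, 0 ≤ j ∧ j < i) →
    l.foldl (fun d j =>
        PySem.List.pySetD d i (PySem.List.pyGetD d i 0 + PySem.List.pyGetD d j 0 * 2)) dp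
      = PySem.List.pySetD dp i
          (PySem.List.pyGetD dp i 0 + (l.map (fun j => PySem.List.pyGetD dp j 0)).sum * 2) := by
  intro l
  induction l with
  | nil =>
    intro dp hlen _
    simp only [List.foldl_nil, List.map_nil, List.sum_nil, zero_mul, add_zero]
    rw [PySem.List.pyGetD_eq_getElem _ 0 hi hlen, PySem.List.pySetD_of_nonneg _ _ hi,
      List.set_getElem_self]
  | cons j rest ih =>
    intro dp hlen hall
    obtain ⟨hj0, hji⟩ := hall j (List.mem_cons_self)
    have hall' : ∀ x ∈ rest, 0 ≤ x ∧ x < i := fun x hx => hall x (List.mem_cons_of_mem _ hx)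
    simp only [List.foldl_cons]
    rw [ih _ (by rw [PySem.List.pySetD_of_nonneg _ _ hi]; simpa using hlen) hall']
    rw [setD_setD _ _ _ _ hi]
    rw [getD_setD_eq _ _ _ hi hlen]
    have hrest : (rest.map (fun x => PySem.List.pyGetD
        (PySem.List.pySetD dp i (PySem.List.pyGetD dp i 0 + PySem.List.pyGetD dp j 0 * 2)) x 0)).sum
        = (rest.map (fun x => PySem.List.pyGetD dp x 0)).sum := by
      apply congrArg
      apply List.map_congr_left
      intro x hx
      exact getD_setD_ne dp i x _ (ne_of_lt (hall' x hx).2) (hall' x hx).1 hi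
    rw [hrest]
    simp only [List.map_cons, List.sum_cons]
    ring_nf

lemma mk_length (n m : Int) : ((mk n m).length : Int) = (n + 1).toNat := by
  simp [mk, PySem.List.length_pyRange_one]

lemma mk_get (n m j : Int) (h0 : 0 ≤ j) (h1 : j < n + 1) :
    PySem.List.pyGetD (mk n m) j 0 = if j ≤ m then val j else 0 := by
  exact PySem.List.pyGetD_map_pyRange_of_nonneg _ (n+1) j 0 h0 h1

lemma mk_set (n m : Int) (hm : 0 ≤ m) :
    PySem.List.pySetD (mk n m) (m + 1) (val (m + 1)) = mk n (m + 1) := by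
  rw [PySem.List.pySetD_of_nonneg _ _ (by omega)]
  apply List.ext_getElem
  · simp [mk, PySem.List.length_pyRange_one]
  · intro t h1 h2
    rw [List.getElem_set]
    simp only [mk, List.getElem_map, PySem.List.getElem_pyRange_one]
    have ht : (t : Int) < n + 1 := by
      have := h2
      simp [mk, PySem.List.length_pyRange_one] at this
      omega
    split_ifs <;>
      first
        | rfl
        | (apply congrArg val; omega)
        | omega

lemma init_eq (n : Int) :
    PySem.List.pySetD (PySem.List.pySetD
      ((PySem.List.pyRange 0 (n + 1) 1).map (fun _ => (0 : Int))) 2 3) 4 11 = mk n 5 := by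
  rw [PySem.List.pySetD_of_nonneg _ _ (by omega), PySem.List.pySetD_of_nonneg _ _ (by omega)]
  apply List.ext_getElem
  · simp [mk, PySem.List.length_pyRange_one]
  · intro t h1 h2
    rw [List.getElem_set, List.getElem_set]
    simp only [mk, List.getElem_map, PySem.List.getElem_pyRange_one]
    have ht : (t : Int) < n + 1 := by
      have := h2
      simp [mk, PySem.List.length_pyRange_one] at this
      omega
    by_cases ht5 : (t : Int) ≤ 5
    · have ht5' : t ≤ 5 := by omega
      interval_cases t <;> norm_num <;> decide
    · rw [if_neg (by omega), if_neg (by omega), if_neg (by omega)]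

-- one outer-loop step of A turns mk n m into mk n (m+1)
lemma step_eq (n m : Int) (h5 : 5 ≤ m) (hmn : m < n) :
    (fun dp i =>
        let dp := PySem.List.pySetD dp i (PySem.List.pyGetD dp (i - 2) 0 * 3 + 2)
        let dp := (PySem.List.pyRange (i - 4) (-1) (-2)).foldl
            (fun dp j =>
              PySem.List.pySetD dp i (PySem.List.pyGetD dp i 0 + PySem.List.pyGetD dp j 0 * 2)) dp
        PySem.List.pySetD dp i (PySem.Int.mod (PySem.List.pyGetD dp i 0) 1000000007))
      (mk n m) (m + 1) = mk n (m + 1) := by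
  have hlenM : ((mk n m).length : Int) = n + 1 := by rw [mk_length]; omega
  have hi0 : (0:Int) ≤ m + 1 := by omega
  have hiM : (m + 1 : Int) < ((mk n m).length : Int) := by omega
  have hg1 : PySem.List.pyGetD (mk n m) (m + 1 - 2) 0 = val (m - 1) := by
    rw [show m + 1 - 2 = m - 1 by ring, mk_get n m (m-1) (by omega) (by omega),
      if_pos (by omega)]
  dsimp only
  rw [hg1]
  rw [inner_fold (m+1) hi0 _ _
    (by rw [PySem.List.pySetD_of_nonneg _ _ hi0]; simpa using hiM)
    (fun j hj => by
      have := mem_rstep _ _ hj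
      constructor
      · exact this.1
      · omega)]
  rw [getD_setD_eq _ _ _ hi0 hiM]
  have hmap : ((PySem.List.pyRange (m + 1 - 4) (-1) (-2)).map (fun j =>
      PySem.List.pyGetD (PySem.List.pySetD (mk n m) (m+1) (val (m-1) * 3 + 2)) j 0))
      = (PySem.List.pyRange (m + 1 - 4) (-1) (-2)).map val := by
    apply List.map_congr_left
    intro j hj
    have hjb := mem_rstep _ _ hj
    rw [getD_setD_ne _ _ _ _ (by omega) hjb.1 hi0,
      mk_get n m j hjb.1 (by omega), if_pos (by omega)]
  rw [hmap, getD_setD_eq _ _ _ hi0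
      (by rw [PySem.List.pySetD_of_nonneg _ _ hi0]
          simpa using hiM)]
  have hval : PySem.Int.mod (val (m-1) * 3 + 2
      + ((PySem.List.pyRange (m + 1 - 4) (-1) (-2)).map val).sum * 2) 1000000007
      = val (m + 1) := by
    rcases Int.even_or_odd m with he | ho
    · -- m even: i = m+1 odd
      rcases eq_or_lt_of_le h5 with h6 | h7
      · exfalso; obtain ⟨r, hr⟩ := he; omega
      · by_cases hm6 : m = 6
        · subst hm6
          norm_num
          rw [show PySem.List.pyRange 3 (-1) (-2) = [3, 1] from by decide]
          decide
        · obtain ⟨u, hu⟩ : ∃ u : Nat, m = 2*(u:Int)+8 := by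
            refine ⟨((m-8)/2).toNat, ?_⟩
            obtain ⟨r, hr⟩ := he; omega
          rw [show m + 1 - 4 = 2*(u:Int)+5 by omega, sumOdd u,
            show m - 1 = 2*((u+1:Nat):Int)+5 by push_cast; omega, val_odd (u+1),
            show m + 1 = 2*((u+2:Nat):Int)+5 by push_cast; omega, val_odd (u+2),
            show chain 0 2 (u+1) * 3 + 2 + schain 0 2 u * 2
              = 3 * chain 0 2 (u+1) + 2 + 2 * schain 0 2 u by ring]
          exact chain_step 0 2 (by norm_num) u
    · -- m odd: i = m+1 even
      obtain ⟨u, hu⟩ : ∃ u : Nat, m = 2*(u:Int)+5 := by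
        refine ⟨((m-5)/2).toNat, ?_⟩
        obtain ⟨r, hr⟩ := ho; omega
      rw [show m + 1 - 4 = 2*(u:Int)+2 by omega, sumEven u,
        show m - 1 = 2*((u+1:Nat):Int)+2 by push_cast; omega, val_even (u+1),
        show m + 1 = 2*((u+2:Nat):Int)+2 by push_cast; omega, val_even (u+2),
        show chain 3 11 (u+1) * 3 + 2 + schain 3 11 u * 2
          = 3 * chain 3 11 (u+1) + 2 + 2 * schain 3 11 u by ring]
      exact chain_step 3 11 (by norm_num) u
  rw [hval, setD_setD _ _ _ _ hi0, setD_setD _ _ _ _ hi0, mk_set n m (by omega)]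

lemma outer_fold (n : Int) : ∀ k : Nat, 6 + (k : Int) ≤ n + 1 →
    (PySem.List.pyRange 6 (6 + (k : Int)) 1).foldl (fun dp i =>
        let dp := PySem.List.pySetD dp i (PySem.List.pyGetD dp (i - 2) 0 * 3 + 2)
        let dp := (PySem.List.pyRange (i - 4) (-1) (-2)).foldl
            (fun dp j =>
              PySem.List.pySetD dp i (PySem.List.pyGetD dp i 0 + PySem.List.pyGetD dp j 0 * 2)) dp
        PySem.List.pySetD dp i (PySem.Int.mod (PySem.List.pyGetD dp i 0) 1000000007))
      (mk n 5) = mk n (5 + (k : Int)) := by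
  intro k
  induction k with
  | zero =>
    intro _
    norm_num [PySem.List.pyRange_one_eq_nil]
  | succ k ih =>
    intro hk
    have hk' : 6 + (k : Int) ≤ n + 1 := by push_cast at hk ⊢; omega
    rw [show (6 : Int) + ((k + 1 : Nat) : Int) = (6 + (k : Int)) + 1 by push_cast; ring,
      PySem.List.pyRange_one_succ_right (by omega), List.foldl_append, ih hk']
    have := step_eq n (5 + (k : Int)) (by omega) (by push_cast at hk; omega)
    simp only [List.foldl_cons, List.foldl_nil]
    rw [show (6 : Int) + (k : Int) = (5 + (k : Int)) + 1 by ring]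
    rw [show (5 : Int) + ((k + 1 : Nat) : Int) = (5 + (k : Int)) + 1 by push_cast; ring]
    exact this

lemma solution_eq_val (n : Int) (hn : 6 ≤ n) : solution n = val n := by
  unfold solution
  dsimp only
  rw [if_pos (by omega : n > 2)]
  rw [init_eq n]
  have hk : (6 : Int) + (((n - 5).toNat : Nat) : Int) = n + 1 := by omega
  have := outer_fold n (n - 5).toNat (by omega)
  rw [hk] at this
  rw [this]
  rw [show (5 : Int) + (((n - 5).toNat : Nat) : Int) = n by omega]
  rw [mk_get n n n (by omega) (by omega), if_pos le_rfl]

-- ----- B side -----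

lemma Se_val (u : Nat) : Se (2 * (u : Int) + 2) = schain 3 11 u := by
  have hq : ((2 * (u : Int) + 2 - 2) / 2).toNat = u := by omega
  simp only [Se, hq]
  rw [if_neg (by omega)]

lemma So_val (u : Nat) : So (2 * (u : Int) + 5) = schain 0 2 u := by
  have hq : ((2 * (u : Int) + 5 - 5) / 2).toNat = u := by omega
  simp only [So, hq]
  rw [if_neg (by omega)]

lemma Se_step (u : Nat) : Se (2 * (u : Int) + 1) + val (2 * (u : Int) + 2) = Se (2 * (u : Int) + 2) := by
  rw [Se_val u, val_even u]
  cases u with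
  | zero => simp [Se, schain, chain]
  | succ u =>
    have hq : ((2 * ((u+1 : Nat) : Int) + 1 - 2) / 2).toNat = u := by push_cast; omega
    simp only [Se, hq]
    rw [if_neg (by push_cast; omega)]
    show schain 3 11 u + chain 3 11 (u+1) = schain 3 11 (u+1)
    rw [schain]

lemma So_even (u : Nat) : So (2 * (u : Int) + 1) = So (2 * (u : Int) + 2) := by
  by_cases h : (u : Int) ≤ 1
  · simp only [So]
    rw [if_pos (by omega), if_pos (by omega)]
  · simp only [So]
    rw [if_neg (by omega), if_neg (by omega)]
    congr 1
    omega

lemma So_step (u : Nat) : So (2 * (u : Int) + 2) + val (2 * (u : Int) + 3) = So (2 * (u : Int) + 3) := by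
  cases u with
  | zero => simp [So, val]
  | succ u =>
    cases u with
    | zero =>
      norm_num
      decide
    | succ u =>
      have h3 : (2 * ((u+2 : Nat) : Int) + 3) = 2 * ((u+1 : Nat) : Int) + 5 := by push_cast; ring
      rw [h3, So_val (u+1), val_odd (u+1)]
      have hq : ((2 * ((u+2 : Nat) : Int) + 2 - 5) / 2).toNat = u := by push_cast; omega
      simp only [So, hq]
      rw [if_neg (by push_cast; omega)]
      show schain 0 2 u + chain 0 2 (u+1) = schain 0 2 (u+1)
      rw [schain]

lemma Se_odd (u : Nat) : Se (2 * (u : Int) + 2) = Se (2 * (u : Int) + 3) := by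
  simp only [Se]
  rw [if_neg (by omega), if_neg (by omega)]
  congr 1
  omega

-- one loop step of B: dp advances from mk n m to mk n (m+1), the running sums
-- advance from (≤ m-4) to (≤ m-3)
lemma alt_step (n m : Int) (h5 : 5 ≤ m) (hmn : m < n) :
    (fun (st : List Int × List Int) (i : Int) =>
        let p := PySem.Int.mod i 2
        let sums := PySem.List.pySetD st.2 p
            (PySem.List.pyGetD st.2 p 0 + PySem.List.pyGetD st.1 (i - 4) 0)
        let dp := PySem.List.pySetD st.1 i
            (PySem.Int.mod (PySem.List.pyGetD st.1 (i - 2) 0 * 3 + 2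
              + 2 * PySem.List.pyGetD sums p 0) 1000000007)
        (dp, sums)) (mk n m, [Se (m - 4), So (m - 4)]) (m + 1)
      = (mk n (m + 1), [Se (m - 3), So (m - 3)]) := by
  have hlenM : ((mk n m).length : Int) = n + 1 := by rw [mk_length]; omega
  have hi0 : (0:Int) ≤ m + 1 := by omega
  have hiM : (m + 1 : Int) < ((mk n m).length : Int) := by omega
  have hg4 : PySem.List.pyGetD (mk n m) (m + 1 - 4) 0 = val (m - 3) := by
    rw [show m + 1 - 4 = m - 3 by ring, mk_get n m (m-3) (by omega) (by omega),
      if_pos (by omega)]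
  have hg2 : PySem.List.pyGetD (mk n m) (m + 1 - 2) 0 = val (m - 1) := by
    rw [show m + 1 - 2 = m - 1 by ring, mk_get n m (m-1) (by omega) (by omega),
      if_pos (by omega)]
  dsimp only
  rw [hg4, hg2]
  rcases Int.even_or_odd m with he | ho
  · -- m even: i = m+1 odd, p = 1
    obtain ⟨u, hu⟩ : ∃ u : Nat, m = 2*(u:Int)+6 := by
      refine ⟨((m-6)/2).toNat, ?_⟩
      obtain ⟨r, hr⟩ := he; omega
    have hp : PySem.Int.mod (m + 1) 2 = 1 := by
      rw [PySem.Int.mod_eq_emod_of_pos (by norm_num)]; omega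
    rw [hp]
    have hsums : PySem.List.pySetD [Se (m - 4), So (m - 4)] 1
        (PySem.List.pyGetD [Se (m - 4), So (m - 4)] 1 0 + val (m - 3))
        = [Se (m - 3), So (m - 3)] := by
      have hso : So (m - 4) + val (m - 3) = So (m - 3) := by
        have := So_step u
        rw [show m - 4 = 2*(u:Int)+2 by omega, show m - 3 = 2*(u:Int)+3 by omega]
        exact this
      have hse : Se (m - 4) = Se (m - 3) := by
        have := Se_odd u
        rw [show m - 4 = 2*(u:Int)+2 by omega, show m - 3 = 2*(u:Int)+3 by omega]
        exact this
      simp [PySem.List.pyGetD, PySem.List.pyGet?, PySem.List.pyIdx?, PySem.List.pySetD,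
        PySem.List.pySet?, hso, hse]
    rw [hsums]
    have hget1 : PySem.List.pyGetD [Se (m - 3), So (m - 3)] 1 0 = So (m - 3) := by
      simp [PySem.List.pyGetD, PySem.List.pyGet?, PySem.List.pyIdx?]
    rw [hget1]
    have hval : PySem.Int.mod (val (m - 1) * 3 + 2 + 2 * So (m - 3)) 1000000007
        = val (m + 1) := by
      cases u with
      | zero =>
        subst hu
        norm_num
        decide
      | succ u =>
        rw [show m - 1 = 2*((u+1:Nat):Int)+5 by push_cast at hu ⊢; omega, val_odd (u+1),
          show m - 3 = 2*((u:Nat):Int)+5 by push_cast at hu ⊢; omega, So_val u,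
          show m + 1 = 2*((u+2:Nat):Int)+5 by push_cast at hu ⊢; omega, val_odd (u+2),
          show chain 0 2 (u+1) * 3 + 2 + 2 * schain 0 2 u
            = 3 * chain 0 2 (u+1) + 2 + 2 * schain 0 2 u by ring]
        exact chain_step 0 2 (by norm_num) u
    rw [hval, mk_set n m (by omega)]
  · -- m odd: i = m+1 even, p = 0
    obtain ⟨u, hu⟩ : ∃ u : Nat, m = 2*(u:Int)+5 := by
      refine ⟨((m-5)/2).toNat, ?_⟩
      obtain ⟨r, hr⟩ := ho; omega
    have hp : PySem.Int.mod (m + 1) 2 = 0 := by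
      rw [PySem.Int.mod_eq_emod_of_pos (by norm_num)]; omega
    rw [hp]
    have hsums : PySem.List.pySetD [Se (m - 4), So (m - 4)] 0
        (PySem.List.pyGetD [Se (m - 4), So (m - 4)] 0 0 + val (m - 3))
        = [Se (m - 3), So (m - 3)] := by
      have hse : Se (m - 4) + val (m - 3) = Se (m - 3) := by
        have := Se_step u
        rw [show m - 4 = 2*(u:Int)+1 by omega, show m - 3 = 2*(u:Int)+2 by omega]
        exact this
      have hso : So (m - 4) = So (m - 3) := by
        have := So_even u
        rw [show m - 4 = 2*(u:Int)+1 by omega, show m - 3 = 2*(u:Int)+2 by omega]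
        exact this
      simp [PySem.List.pyGetD, PySem.List.pyGet?, PySem.List.pyIdx?, PySem.List.pySetD,
        PySem.List.pySet?, hse, hso]
    rw [hsums]
    have hget0 : PySem.List.pyGetD [Se (m - 3), So (m - 3)] 0 0 = Se (m - 3) := by
      simp [PySem.List.pyGetD, PySem.List.pyGet?, PySem.List.pyIdx?]
    rw [hget0]
    have hval : PySem.Int.mod (val (m - 1) * 3 + 2 + 2 * Se (m - 3)) 1000000007
        = val (m + 1) := by
      rw [show m - 1 = 2*((u+1:Nat):Int)+2 by push_cast; omega, val_even (u+1)]
      rw [show m - 3 = 2*((u:Nat):Int)+2 by omega, Se_val u]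
      rw [show m + 1 = 2*((u+2:Nat):Int)+2 by push_cast; omega, val_even (u+2)]
      rw [show chain 3 11 (u+1) * 3 + 2 + 2 * schain 3 11 u
          = 3 * chain 3 11 (u+1) + 2 + 2 * schain 3 11 u by ring]
      exact chain_step 3 11 (by norm_num) u
    rw [hval, mk_set n m (by omega)]

lemma alt_fold (n : Int) : ∀ k : Nat, 6 + (k : Int) ≤ n + 1 →
    (PySem.List.pyRange 6 (6 + (k : Int)) 1).foldl (fun (st : List Int × List Int) (i : Int) =>
        let p := PySem.Int.mod i 2
        let sums := PySem.List.pySetD st.2 p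
            (PySem.List.pyGetD st.2 p 0 + PySem.List.pyGetD st.1 (i - 4) 0)
        let dp := PySem.List.pySetD st.1 i
            (PySem.Int.mod (PySem.List.pyGetD st.1 (i - 2) 0 * 3 + 2
              + 2 * PySem.List.pyGetD sums p 0) 1000000007)
        (dp, sums)) (mk n 5, [Se 1, So 1])
      = (mk n (5 + (k : Int)), [Se ((k : Int) + 1), So ((k : Int) + 1)]) := by
  intro k
  induction k with
  | zero =>
    intro _
    norm_num [PySem.List.pyRange_one_eq_nil]
  | succ k ih =>
    intro hk
    have hk' : 6 + (k : Int) ≤ n + 1 := by push_cast at hk ⊢; omega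
    rw [show (6 : Int) + ((k + 1 : Nat) : Int) = (6 + (k : Int)) + 1 by push_cast; ring,
      PySem.List.pyRange_one_succ_right (by omega), List.foldl_append, ih hk']
    have h := alt_step n (5 + (k : Int)) (by omega) (by push_cast at hk; omega)
    rw [show (5 + (k : Int)) - 4 = (k : Int) + 1 by ring,
      show (5 + (k : Int)) - 3 = (k : Int) + 2 by ring] at h
    simp only [List.foldl_cons, List.foldl_nil]
    rw [show (6 : Int) + (k : Int) = (5 + (k : Int)) + 1 by ring,
      show (5 : Int) + ((k + 1 : Nat) : Int) = (5 + (k : Int)) + 1 by push_cast; ring,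
      show (((k + 1 : Nat) : Int)) + 1 = (k : Int) + 2 by push_cast; ring]
    exact h

lemma solution_alt_eq_val (n : Int) (hn : 6 ≤ n) : solution_alt n = val n := by
  unfold solution_alt
  dsimp only
  rw [if_pos (by omega : n > 2)]
  rw [init_eq n]
  have h10 : ([0, 0] : List Int) = [Se 1, So 1] := by simp [Se, So]
  rw [h10]
  have hk : (6 : Int) + (((n - 5).toNat : Nat) : Int) = n + 1 := by omega
  have := alt_fold n (n - 5).toNat (by omega)
  rw [hk] at this
  rw [this]
  rw [show (5 : Int) + (((n - 5).toNat : Nat) : Int) = n by omega]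
  rw [mk_get n n n (by omega) (by omega), if_pos le_rfl]

-- ===== VERDICT (by name: the statement is the Claim_ definition above) =====
theorem solution_spec : Claim_equal_solution := by
  intro n _ hpre
  unfold Spec_solution
  obtain ⟨h2, h3⟩ := hpre
  by_cases h6 : 6 ≤ n
  · rw [solution_eq_val n h6, solution_alt_eq_val n h6]
  · have hc : n = 2 ∨ n = 4 ∨ n = 5 := by omega
    rcases hc with h | h | h <;> subst h <;> decide
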